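-- pv_equiv track=rewrite | github.com/shimwoojin/Jungle_Week8_Team2 | Scripts/GenerateProjectFiles.py | collect_all_filters
-- ===== SOURCE A (Python) =====
-- def get_filter(rel_path: str) -> str:
--     """Return the filter path from a relative path."""
--     parts = rel_path.replace("/", "\\").rsplit("\\", 1)
--     return parts[0] if len(parts) > 1 else ""
--
-- def collect_all_filters(files: dict[str, list[str]]) -> set[str]:
--     """Collect all unique filter paths including parent paths."""
--     filters = set()
--
--     for file_list in files.values():
--         for f in file_list:
--             filt = get_filter(f)
--             if not filt:
--                 continue
--
--             parts = filt.split("\\")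
--             for i in range(1, len(parts) + 1):
--                 filters.add("\\".join(parts[:i]))
--
--     return filters
-- ===== SOURCE B (Python) =====
-- def collect_all_filters(files: dict) -> set:
--     """Collect all unique filter paths including parent paths.
--
--     One forward character scan per path: every separator position marks the end of
--     one ancestor filter, so we add the running prefix at each separator instead of
--     splitting into parts and re-joining every prefix slice.
--     """
--     filters = set()
--     for file_list in files.values():
--         for f in file_list:
--             if not any(c == "\\" or c == "/" for c in f[1:]):
--                 # no separator after position 0 means get_filter(f) would be empty
--                 continue
--             cur = ""
--             for c in f:
--                 if c == "\\" or c == "/":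
--                     filters.add(cur)
--                     cur += "\\"
--                 else:
--                     cur += c
--     return filters
-- ===== Notes on version B (the rewrite author's own statement) =====
-- stated objective: alternative
-- what changed: Replaces the replace/rsplit/split pipeline and the inner loop that re-joins every prefix slice parts[:i] with a single forward character scan per path that maintains one running prefix and adds it to the set at each separator, guarded by checking for a separator after position 0.
import Mathlib
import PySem

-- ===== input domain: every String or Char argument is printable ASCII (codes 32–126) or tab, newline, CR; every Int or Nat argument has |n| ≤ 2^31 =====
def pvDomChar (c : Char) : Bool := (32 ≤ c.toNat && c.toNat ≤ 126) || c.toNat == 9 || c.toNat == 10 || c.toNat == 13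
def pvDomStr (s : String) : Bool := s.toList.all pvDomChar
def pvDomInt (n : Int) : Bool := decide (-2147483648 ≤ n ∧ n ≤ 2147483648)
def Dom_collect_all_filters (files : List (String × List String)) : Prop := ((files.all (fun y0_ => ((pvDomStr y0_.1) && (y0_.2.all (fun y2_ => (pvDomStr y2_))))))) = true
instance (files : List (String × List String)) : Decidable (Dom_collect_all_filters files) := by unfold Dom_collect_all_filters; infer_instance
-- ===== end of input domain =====

-- B replaces A's replace/rsplit/split pipeline and prefix-slice re-joins by one forward
-- character scan per path that adds the running prefix at each separator (alternative, not faster).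

-- ===== PORT A =====
-- hand port of Python's s.rsplit(sep, 1) for a ONE-CHAR separator (PySem has no rsplit):
-- exact — two pieces split at the LAST occurrence of sep, or [s] if sep is absent
def pvRsplit1 : List Char → Char → List (List Char)
  | [], _ => [[]]
  | c :: t, sep =>
    match pvRsplit1 t sep with
    | [r] => if c = sep then [[], r] else [c :: r]
    | a :: rest => (c :: a) :: rest
    | [] => [[]]  -- unreachable: pvRsplit1 never returns []

-- get_filter, at the List Char level (PySem.Str wrappers are thin over PySem.Chars)
def get_filter (rel_path : String) : List Char :=
  let parts := pvRsplit1 (PySem.Chars.replace rel_path.toList ['/'] ['\\']) '\\'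
  if 1 < parts.length then PySem.List.pyGetD parts 0 [] else []

def collect_all_filters (files : List (String × List String)) : List String :=
  files.foldl (fun filters kv =>
    kv.2.foldl (fun filters f =>
      let filt := get_filter f
      if filt = [] then filters
      else
        let parts := PySem.Chars.splitOn filt ['\\']
        (PySem.List.pyRange 1 ((parts.length : Int) + 1) 1).foldl
          (fun filters i =>
            PySem.Set.add filters
              (String.ofList (PySem.Chars.join ['\\'] (PySem.List.slice parts none (some i)))))
          filters) filters) PySem.Set.empty

-- ===== PORT B =====
def collect_all_filters_alt (files : List (String × List String)) : List String :=
  files.foldl (fun filters kv =>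
    kv.2.foldl (fun filters f =>
      if (PySem.List.slice f.toList (some 1) none).any (fun c => c == '\\' || c == '/') then
        (f.toList.foldl
          (fun (st : PySem.Set String × List Char) c =>
            if c == '\\' || c == '/' then (PySem.Set.add st.1 (String.ofList st.2), st.2 ++ ['\\'])
            else (st.1, st.2 ++ [c]))
          (filters, [])).1
      else filters) filters) PySem.Set.empty

-- ===== PRECONDITION & SPEC =====
def Spec_collect_all_filters (files : List (String × List String)) (out : List String) : Prop := out = collect_all_filters_alt files
instance (files : List (String × List String)) (out : List String) : Decidable (Spec_collect_all_filters files out) := by unfold Spec_collect_all_filters; infer_instance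

-- ===== CLAIM (what is proved, stated in full; the proofs are below) =====
def Claim_equal_collect_all_filters : Prop := ∀ (files : List (String × List String)), Dom_collect_all_filters files → Spec_collect_all_filters files (collect_all_filters files)

-- ===== LEMMAS AND PROOFS =====

-- normalisation map of replace("/", "\")
def pvNorm (c : Char) : Char := if c = '/' then '\\' else c

-- split on '\' at every occurrence (the shape both sides reduce to)
def pvSplit : List Char → List (List Char)
  | [] => [[]]
  | c :: t => if c = '\\' then [] :: pvSplit t else (pvSplit t).modifyHead (c :: ·)

-- prefixes emitted by B's scan
def pvEmit (cur : List Char) : List Char → List (List Char)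
  | [] => []
  | c :: t => if c = '\\' then cur :: pvEmit (cur ++ ['\\']) t else pvEmit (cur ++ [c]) t

-- the joined prefixes parts[:1] … parts[:n] that A adds
def pvTakeJoins (cur : List Char) : List (List Char) → List (List Char)
  | [] => []
  | [p] => [cur ++ p]
  | p :: ps => (cur ++ p) :: pvTakeJoins (cur ++ p ++ ['\\']) ps

theorem pvReplaceGo_eq (l : List Char) : ∀ (fuel : Nat) (acc : List Char), l.length ≤ fuel →
    PySem.Chars.replace.go ['/'] ['\\'] fuel l acc = acc.reverse ++ l.map pvNorm := by
  induction l with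
  | nil => intro fuel acc _; cases fuel <;> simp [PySem.Chars.replace.go]
  | cons c t ih =>
    intro fuel acc h
    cases fuel with
    | zero => simp at h
    | succ n =>
      rw [PySem.Chars.replace.go]
      by_cases hc : c = '/'
      · simp [hc, List.isPrefixOf]
        rw [ih n _ (by simpa using h)]
        simp [pvNorm]
      · have : (['/'].isPrefixOf (c :: t)) = false := by
          simp only [List.isPrefixOf, Bool.and_eq_false_iff, beq_eq_false_iff_ne, ne_eq]
          exact Or.inl (fun h' => hc h'.symm)
        simp [this]
        rw [ih n _ (by simpa using h)]
        simp [pvNorm, hc]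

theorem pvReplace_eq (cs : List Char) :
    PySem.Chars.replace cs ['/'] ['\\'] = cs.map pvNorm := by
  rw [PySem.Chars.replace]
  simp [pvReplaceGo_eq cs cs.length [] le_rfl]

theorem pvSplit_ne_nil (l : List Char) : pvSplit l ≠ [] := by
  induction l with
  | nil => simp [pvSplit]
  | cons c t ih => by_cases hc : c = '\\' <;> simp [pvSplit, hc] ; intro h; exact ih h

theorem pvSplitGo_eq (l : List Char) : ∀ (fuel : Nat) (cur : List Char) (acc : List (List Char)), l.length < fuel →
    PySem.Chars.splitOn.go ['\\'] fuel l cur acc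
      = acc.reverse ++ (pvSplit l).modifyHead (cur.reverse ++ ·) := by
  induction l with
  | nil =>
    intro fuel cur acc _
    cases fuel <;> simp [PySem.Chars.splitOn.go, pvSplit]
  | cons c t ih =>
    intro fuel cur acc h
    cases fuel with
    | zero => simp at h
    | succ n =>
      rw [PySem.Chars.splitOn.go]
      by_cases hc : c = '\\'
      · have hp : (['\\'].isPrefixOf (c :: t)) = true := by simp [List.isPrefixOf, hc]
        rw [if_pos hp]
        rw [show List.drop (['\\'] : List Char).length (c :: t) = t from rfl]
        rw [ih n [] _ (by simpa using h)]
        simp [pvSplit, hc, List.modifyHead]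
        cases pvSplit t <;> rfl
      · have hp : (['\\'].isPrefixOf (c :: t)) = false := by
          simp only [List.isPrefixOf, Bool.and_eq_false_iff, beq_eq_false_iff_ne, ne_eq]
          exact Or.inl (fun h' => hc h'.symm)
        rw [if_neg (by simp [hp])]
        rw [ih n (c :: cur) acc (by simpa using h)]
        have hne := pvSplit_ne_nil t
        obtain ⟨p, ps, hps⟩ := List.exists_cons_of_ne_nil hne
        simp [pvSplit, hc, hps]

theorem pvSplitOn_eq (cs : List Char) : PySem.Chars.splitOn cs ['\\'] = pvSplit cs := by
  rw [PySem.Chars.splitOn, pvSplitGo_eq cs (cs.length + 1) [] [] (by omega)]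
  have hne := pvSplit_ne_nil cs
  obtain ⟨p, ps, hps⟩ := List.exists_cons_of_ne_nil hne
  simp [hps]

theorem pvJoin_pvSplit (l : List Char) : PySem.Chars.join ['\\'] (pvSplit l) = l := by
  induction l with
  | nil => rw [show pvSplit [] = [[]] from rfl, PySem.Chars.join_singleton]
  | cons c t ih =>
    obtain ⟨p, ps, hps⟩ := List.exists_cons_of_ne_nil (pvSplit_ne_nil t)
    by_cases hc : c = '\\'
    · rw [pvSplit, if_pos hc, hps, PySem.Chars.join_cons_cons, ← hps, ih, hc]; rfl
    · rw [pvSplit, if_neg hc, hps, List.modifyHead]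
      cases ps with
      | nil =>
        rw [PySem.Chars.join_singleton]
        rw [hps, PySem.Chars.join_singleton] at ih
        rw [ih]
      | cons q qs =>
        rw [PySem.Chars.join_cons_cons, ← ih, hps, PySem.Chars.join_cons_cons]
        simp

theorem pvSplit_sepfree (l : List Char) : ∀ p ∈ pvSplit l, '\\' ∉ p := by
  induction l with
  | nil => simp [pvSplit]
  | cons c t ih =>
    obtain ⟨p, ps, hps⟩ := List.exists_cons_of_ne_nil (pvSplit_ne_nil t)
    by_cases hc : c = '\\'
    · rw [pvSplit, if_pos hc]
      intro q hq
      rcases List.mem_cons.mp hq with h | h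
      · simp [h]
      · exact ih q h
    · rw [pvSplit, if_neg hc, hps, List.modifyHead]
      intro q hq
      rcases List.mem_cons.mp hq with h | h
      · subst h
        intro hmem
        rcases List.mem_cons.mp hmem with h' | h'
        · exact hc h'.symm
        · exact ih p (hps ▸ List.mem_cons_self) h'
      · exact ih q (hps ▸ List.mem_cons_of_mem p h)

theorem pvSplit_of_sepfree (p : List Char) (hp : '\\' ∉ p) : pvSplit p = [p] := by
  induction p with
  | nil => rfl
  | cons c t ih =>
    have hc : c ≠ '\\' := fun h => hp (h ▸ List.mem_cons_self)
    rw [pvSplit, if_neg hc, ih (fun h => hp (List.mem_cons_of_mem c h))]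
    rfl

theorem pvSplit_append_sepfree (p : List Char) (hp : '\\' ∉ p) (l : List Char) :
    pvSplit (p ++ l) = (pvSplit l).modifyHead (p ++ ·) := by
  induction p with
  | nil =>
    obtain ⟨q, qs, hqs⟩ := List.exists_cons_of_ne_nil (pvSplit_ne_nil l)
    simp [hqs]
  | cons c t ih =>
    have hc : c ≠ '\\' := fun h => hp (h ▸ List.mem_cons_self)
    rw [List.cons_append, pvSplit, if_neg hc, ih (fun h => hp (List.mem_cons_of_mem c h))]
    obtain ⟨q, qs, hqs⟩ := List.exists_cons_of_ne_nil (pvSplit_ne_nil l)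
    simp [hqs]

theorem pvSplit_join (ps : List (List Char)) : (∀ p ∈ ps, '\\' ∉ p) → ps ≠ [] →
    pvSplit (PySem.Chars.join ['\\'] ps) = ps := by
  induction ps with
  | nil => intro _ h; exact absurd rfl h
  | cons p ps ih =>
    intro h _
    cases ps with
    | nil => rw [PySem.Chars.join_singleton]; exact pvSplit_of_sepfree p (h p List.mem_cons_self)
    | cons q qs =>
      rw [PySem.Chars.join_cons_cons, List.append_assoc, pvSplit_append_sepfree p (h p List.mem_cons_self)]
      have : pvSplit (['\\'] ++ PySem.Chars.join ['\\'] (q :: qs)) = [] :: pvSplit (PySem.Chars.join ['\\'] (q :: qs)) := by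
        rw [List.singleton_append, pvSplit, if_pos rfl]
      rw [this, ih (fun r hr => h r (List.mem_cons_of_mem p hr)) (by simp)]
      simp

theorem pvSplit_len_one_iff (l : List Char) : (pvSplit l).length = 1 ↔ '\\' ∉ l := by
  constructor
  · intro h
    obtain ⟨p, ps, hps⟩ := List.exists_cons_of_ne_nil (pvSplit_ne_nil l)
    have : ps = [] := by rw [hps] at h; simpa using h
    subst this
    have hl : l = p := by
      have h2 := pvJoin_pvSplit l
      rw [hps, PySem.Chars.join_singleton] at h2
      exact h2.symm
    rw [hl]
    exact pvSplit_sepfree l p (hps ▸ List.mem_cons_self)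
  · intro h; rw [pvSplit_of_sepfree l h]; rfl

theorem pvJoin_cons_head (c : Char) (a : List Char) (rs : List (List Char)) :
    PySem.Chars.join ['\\'] ((c :: a) :: rs) = c :: PySem.Chars.join ['\\'] (a :: rs) := by
  cases rs with
  | nil => rw [PySem.Chars.join_singleton, PySem.Chars.join_singleton]
  | cons r rs => rw [PySem.Chars.join_cons_cons, PySem.Chars.join_cons_cons]; simp

theorem pvJoin_nil_cons (r : List Char) (rs : List (List Char)) :
    PySem.Chars.join ['\\'] ([] :: r :: rs) = '\\' :: PySem.Chars.join ['\\'] (r :: rs) := by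
  rw [PySem.Chars.join_cons_cons]; rfl

theorem pvRsplit1_eq (l : List Char) :
    pvRsplit1 l '\\' = if (pvSplit l).length = 1 then [l]
      else [PySem.Chars.join ['\\'] (pvSplit l).dropLast, (pvSplit l).getLastD []] := by
  induction l with
  | nil => rfl
  | cons c t ih =>
    obtain ⟨a, as, has⟩ := List.exists_cons_of_ne_nil (pvSplit_ne_nil t)
    cases as with
    | nil =>
      have hlen : (pvSplit t).length = 1 := by rw [has]; rfl
      have hta : t = a := by
        have h2 := pvJoin_pvSplit t
        rw [has, PySem.Chars.join_singleton] at h2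
        exact h2.symm
      have h2 : pvRsplit1 t '\\' = [t] := by rw [ih, if_pos hlen]
      by_cases hc : c = '\\'
      · subst hc
        simp only [pvRsplit1, h2]
        rw [pvSplit, if_pos rfl, has]
        show ([[], t] : List (List Char)) = _
        rw [if_neg (by simp)]
        simp [PySem.Chars.join_singleton, hta]
      · simp only [pvRsplit1, h2, if_neg hc]
        rw [pvSplit, if_neg hc, has, List.modifyHead]
        show ([c :: t] : List (List Char)) = _
        rw [if_pos (show ([c :: a] : List (List Char)).length = 1 from rfl), hta]
    | cons b bs =>
      have hlen : ¬ (pvSplit t).length = 1 := by rw [has]; simp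
      have h2 : pvRsplit1 t '\\' = [PySem.Chars.join ['\\'] (pvSplit t).dropLast, (pvSplit t).getLastD []] := by
        rw [ih, if_neg hlen]
      by_cases hc : c = '\\'
      · subst hc
        simp only [pvRsplit1, h2]
        rw [pvSplit, if_pos rfl]
        show (('\\' :: PySem.Chars.join ['\\'] (pvSplit t).dropLast) :: [(pvSplit t).getLastD []] : List (List Char)) = _
        rw [if_neg (by simp [has])]
        rw [List.dropLast_cons_of_ne_nil (pvSplit_ne_nil t), has,
            List.dropLast_cons_of_ne_nil (show (b :: bs : List (List Char)) ≠ [] by simp),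
            pvJoin_nil_cons]
        simp
      · simp only [pvRsplit1, h2]
        rw [pvSplit, if_neg hc, has, List.modifyHead]
        rw [if_neg (by simp)]
        rw [List.dropLast_cons_of_ne_nil (show (b :: bs : List (List Char)) ≠ [] by simp) (x := a),
            List.dropLast_cons_of_ne_nil (show (b :: bs : List (List Char)) ≠ [] by simp) (x := c :: a),
            pvJoin_cons_head]
        simp

theorem pvEmit_sepfree (p : List Char) : ∀ (cur rest : List Char), '\\' ∉ p →
    pvEmit cur (p ++ rest) = pvEmit (cur ++ p) rest := by
  induction p with
  | nil => intro cur rest _; simp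
  | cons c t ih =>
    intro cur rest hp
    have hc : c ≠ '\\' := fun h => hp (h ▸ List.mem_cons_self)
    rw [List.cons_append, pvEmit, if_neg hc, ih _ _ (fun h => hp (List.mem_cons_of_mem c h))]
    simp

theorem pvEmit_join (ps : List (List Char)) : ∀ (cur : List Char), ps ≠ [] → (∀ p ∈ ps, '\\' ∉ p) →
    pvEmit cur (PySem.Chars.join ['\\'] ps) ++ [cur ++ PySem.Chars.join ['\\'] ps]
      = pvTakeJoins cur ps := by
  induction ps with
  | nil => intro _ h; exact absurd rfl h
  | cons p ps ih =>
    intro cur _ h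
    cases ps with
    | nil =>
      rw [PySem.Chars.join_singleton]
      have h0 := pvEmit_sepfree p cur [] (h p List.mem_cons_self)
      simp only [List.append_nil] at h0
      rw [h0]
      rfl
    | cons q qs =>
      rw [PySem.Chars.join_cons_cons, List.append_assoc,
          pvEmit_sepfree p cur _ (h p List.mem_cons_self)]
      rw [show (['\\'] ++ PySem.Chars.join ['\\'] (q :: qs)) = '\\' :: PySem.Chars.join ['\\'] (q :: qs) from rfl]
      rw [pvEmit, if_pos rfl]
      rw [pvTakeJoins]
      rw [List.cons_append, ← List.append_assoc, ← ih (cur ++ p ++ ['\\']) (List.cons_ne_nil q qs) (fun r hr => h r (List.mem_cons_of_mem p hr))]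
      simp
      all_goals (intro hx; cases hx)

theorem pvTakeJoins_append_last (ps : List (List Char)) : ∀ (cur t : List Char), ps ≠ [] →
    pvTakeJoins cur (ps ++ [t])
      = pvTakeJoins cur ps ++ [cur ++ PySem.Chars.join ['\\'] (ps ++ [t])] := by
  induction ps with
  | nil => intro _ _ h; exact absurd rfl h
  | cons p ps ih =>
    intro cur t _
    cases ps with
    | nil =>
      show pvTakeJoins cur [p, t] = _
      rw [pvTakeJoins, pvTakeJoins, pvTakeJoins]
      rw [show ([p] ++ [t] : List (List Char)) = [p, t] from rfl]
      rw [PySem.Chars.join_cons_cons, PySem.Chars.join_singleton]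
      simp
      all_goals (intro hx; cases hx)
    | cons q qs =>
      simp only [List.cons_append] at ih ⊢
      rw [pvTakeJoins, ih _ _ (List.cons_ne_nil q qs)]
      rw [show pvTakeJoins cur (p :: q :: qs) = (cur ++ p) :: pvTakeJoins (cur ++ p ++ ['\\']) (q :: qs) from rfl]
      rw [PySem.Chars.join_cons_cons]
      simp
      all_goals (intro hx; cases hx)

theorem pvTakeJoins_map (ps : List (List Char)) : ∀ (cur : List Char),
    pvTakeJoins cur ps
      = (List.range ps.length).map (fun i => cur ++ PySem.Chars.join ['\\'] (ps.take (i + 1))) := by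
  induction ps with
  | nil => intro cur; rfl
  | cons p ps ih =>
    intro cur
    cases ps with
    | nil => simp [pvTakeJoins, PySem.Chars.join_singleton]
    | cons q qs =>
      rw [pvTakeJoins, ih]
      rw [show ((p :: q :: qs : List (List Char))).length = (q :: qs).length + 1 from rfl,
          List.range_succ_eq_map, List.map_cons, List.map_map]
      congr 1
      · simp [PySem.Chars.join_singleton]
      · apply List.map_congr_left
        intro i hi
        simp only [Function.comp_apply, List.take_succ_cons, PySem.Chars.join_cons_cons]
        simp
      all_goals (intro hx; cases hx)

theorem pvAFoldAux (parts : List (List Char)) (n : Nat) : ∀ (filters : PySem.Set String),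
    (PySem.List.pyRange 1 ((n : Int) + 1) 1).foldl
      (fun fl i => PySem.Set.add fl (String.ofList (PySem.Chars.join ['\\'] (PySem.List.slice parts none (some i))))) filters
    = PySem.Set.update filters
        ((List.range n).map (fun i => String.ofList (PySem.Chars.join ['\\'] (parts.take (i + 1))))) := by
  induction n with
  | zero =>
    intro filters
    rw [show (((0 : Nat) : Int) + 1) = 1 by norm_num]
    rw [show PySem.List.pyRange 1 1 1 = [] from by decide]
    rfl
  | succ m ih =>
    intro filters
    rw [show (((m + 1 : Nat) : Int) + 1) = ((m : Int) + 1) + 1 by push_cast; ring]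
    rw [PySem.List.pyRange_one_succ_right (by omega), List.foldl_append, ih]
    rw [List.range_succ, List.map_append]
    simp only [PySem.Set.update]
    rw [List.foldl_append]
    simp only [List.map_cons, List.map_nil, List.foldl_cons, List.foldl_nil]
    rw [show ((m : Int) + 1) = ((m + 1 : Nat) : Int) by push_cast; ring,
        PySem.List.slice_to parts (by positivity)]
    simp

theorem pvAFold (parts : List (List Char)) (filters : PySem.Set String) :
    (PySem.List.pyRange 1 ((parts.length : Int) + 1) 1).foldl
      (fun fl i => PySem.Set.add fl (String.ofList (PySem.Chars.join ['\\'] (PySem.List.slice parts none (some i))))) filters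
    = PySem.Set.update filters ((pvTakeJoins [] parts).map String.ofList) := by
  rw [pvAFoldAux parts parts.length filters, pvTakeJoins_map, List.map_map]
  simp [Function.comp_def]

theorem pvB_loop (cs : List Char) : ∀ (s0 : PySem.Set String) (cur : List Char),
    cs.foldl
      (fun (st : PySem.Set String × List Char) c =>
        if c == '\\' || c == '/' then (PySem.Set.add st.1 (String.ofList st.2), st.2 ++ ['\\'])
        else (st.1, st.2 ++ [c]))
      (s0, cur)
      = (PySem.Set.update s0 ((pvEmit cur (cs.map pvNorm)).map String.ofList), cur ++ cs.map pvNorm) := by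
  induction cs with
  | nil => intro s0 cur; simp [pvEmit, PySem.Set.update]
  | cons c cs ih =>
    intro s0 cur
    rw [List.foldl_cons]
    by_cases hc : c = '\\' ∨ c = '/'
    · have hb : (c == '\\' || c == '/') = true := by
        rcases hc with h | h <;> simp [h]
      have hn : pvNorm c = '\\' := by
        rcases hc with h | h <;> simp [pvNorm, h]
      rw [if_pos hb, ih]
      rw [List.map_cons, hn]
      rw [show pvEmit cur ('\\' :: cs.map pvNorm) = cur :: pvEmit (cur ++ ['\\']) (cs.map pvNorm) from by rw [pvEmit, if_pos rfl]]
      rw [List.map_cons]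
      rw [show PySem.Set.update s0 (String.ofList cur :: (pvEmit (cur ++ ['\\']) (cs.map pvNorm)).map String.ofList)
            = PySem.Set.update (PySem.Set.add s0 (String.ofList cur)) ((pvEmit (cur ++ ['\\']) (cs.map pvNorm)).map String.ofList) from rfl]
      simp
    · have h1 : c ≠ '\\' := fun h => hc (Or.inl h)
      have h2 : c ≠ '/' := fun h => hc (Or.inr h)
      have hb : (c == '\\' || c == '/') = false := by simp [h1, h2]
      have hn : pvNorm c = c := by simp [pvNorm, h2]
      rw [if_neg (by simp [hb]), ih]
      rw [List.map_cons, hn]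
      rw [show pvEmit cur (c :: cs.map pvNorm) = pvEmit (cur ++ [c]) (cs.map pvNorm) from by
            rw [pvEmit, if_neg (fun h => hc (Or.inl h))]]
      simp

theorem pvPerFile (filters : PySem.Set String) (f : String) :
    (let filt := get_filter f
     if filt = [] then filters
     else
       let parts := PySem.Chars.splitOn filt ['\\']
       (PySem.List.pyRange 1 ((parts.length : Int) + 1) 1).foldl
         (fun filters i =>
           PySem.Set.add filters
             (String.ofList (PySem.Chars.join ['\\'] (PySem.List.slice parts none (some i)))))
         filters)
    = (if (PySem.List.slice f.toList (some 1) none).any (fun c => c == '\\' || c == '/') then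
        (f.toList.foldl
          (fun (st : PySem.Set String × List Char) c =>
            if c == '\\' || c == '/' then (PySem.Set.add st.1 (String.ofList st.2), st.2 ++ ['\\'])
            else (st.1, st.2 ++ [c]))
          (filters, [])).1
      else filters) := by
  have hrep : PySem.Chars.replace f.toList ['/'] ['\\'] = f.toList.map pvNorm := pvReplace_eq _
  have hslice : PySem.List.slice f.toList (some 1) none = f.toList.drop 1 := by
    rw [PySem.List.slice_from f.toList (by norm_num)]
    rfl
  have hguard : ((f.toList.drop 1).any (fun c => c == '\\' || c == '/') = true)
      ↔ '\\' ∈ (f.toList.map pvNorm).drop 1 := by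
    rw [List.any_eq_true, ← List.map_drop]
    constructor
    · rintro ⟨c, hc, hcb⟩
      have hn : pvNorm c = '\\' := by
        rcases (by simpa using hcb : c = '\\' ∨ c = '/') with h | h <;> simp [pvNorm, h]
      exact List.mem_map.mpr ⟨c, hc, hn⟩
    · intro hmem
      obtain ⟨c, hc, hcn⟩ := List.mem_map.mp hmem
      refine ⟨c, hc, ?_⟩
      simp only [pvNorm] at hcn
      split_ifs at hcn with h
      · simp [h]
      · simp [hcn]
  show (if get_filter f = [] then filters else _) = _
  by_cases hg : '\\' ∈ (f.toList.map pvNorm).drop 1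
  · -- guard true on both sides
    have hmem : '\\' ∈ f.toList.map pvNorm := List.mem_of_mem_drop hg
    have hlen1 : ¬ (pvSplit (f.toList.map pvNorm)).length = 1 := by
      rw [pvSplit_len_one_iff]
      intro hnot
      exact hnot hmem
    have hmsne := pvSplit_ne_nil (f.toList.map pvNorm)
    have hfilt : get_filter f
        = PySem.Chars.join ['\\'] (pvSplit (f.toList.map pvNorm)).dropLast := by
      simp only [get_filter, hrep, pvRsplit1_eq, if_neg hlen1]
      rw [if_pos (by simp)]
      rw [PySem.List.pyGetD_zero_cons]
    obtain ⟨T, hT⟩ : ∃ T, pvSplit (f.toList.map pvNorm)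
        = (pvSplit (f.toList.map pvNorm)).dropLast ++ [T] :=
      ⟨(pvSplit (f.toList.map pvNorm)).getLast hmsne,
        (List.dropLast_append_getLast hmsne).symm⟩
    have hTfree : '\\' ∉ T :=
      pvSplit_sepfree (f.toList.map pvNorm) T (by rw [hT]; simp)
    have hpsfree : ∀ p ∈ (pvSplit (f.toList.map pvNorm)).dropLast, '\\' ∉ p :=
      fun p hp => pvSplit_sepfree (f.toList.map pvNorm) p (List.dropLast_subset _ hp)
    have hpsne : (pvSplit (f.toList.map pvNorm)).dropLast ≠ [] := by
      intro h0
      apply hlen1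
      rw [hT, h0]
      rfl
    have hjm : PySem.Chars.join ['\\']
        ((pvSplit (f.toList.map pvNorm)).dropLast ++ [T]) = f.toList.map pvNorm := by
      rw [← hT, pvJoin_pvSplit]
    have hJne : PySem.Chars.join ['\\'] (pvSplit (f.toList.map pvNorm)).dropLast ≠ [] := by
      intro h0
      obtain ⟨p, ps', hps'⟩ := List.exists_cons_of_ne_nil hpsne
      cases ps' with
      | nil =>
        rw [hps', PySem.Chars.join_singleton] at h0
        have hm2 : f.toList.map pvNorm = '\\' :: T := by
          rw [← hjm, hps', h0]
          rw [show (([] : List Char) :: [] ++ [T] : List (List Char)) = [] :: T :: [] from rfl]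
          rw [pvJoin_nil_cons, PySem.Chars.join_singleton]
        rw [hm2] at hg
        simp at hg
        exact hTfree hg
      | cons q qs' =>
        rw [hps', PySem.Chars.join_cons_cons] at h0
        simp at h0
    rw [if_neg (fun h => hJne (hfilt ▸ h))]
    have hgB : (PySem.List.slice f.toList (some 1) none).any (fun c => c == '\\' || c == '/') = true := by
      rw [hslice]
      exact hguard.mpr hg
    rw [if_pos hgB]
    show (PySem.List.pyRange 1 (((PySem.Chars.splitOn (get_filter f) ['\\']).length : Int) + 1) 1).foldl _ filters = _
    have hparts : PySem.Chars.splitOn (get_filter f) ['\\']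
        = (pvSplit (f.toList.map pvNorm)).dropLast := by
      rw [hfilt, pvSplitOn_eq, pvSplit_join _ hpsfree hpsne]
    rw [hparts, pvAFold, pvB_loop]
    suffices hEq : pvEmit [] (f.toList.map pvNorm)
        = pvTakeJoins [] (pvSplit (f.toList.map pvNorm)).dropLast by
      rw [hEq]
    have he := pvEmit_join ((pvSplit (f.toList.map pvNorm)).dropLast ++ [T]) [] (by simp)
      (by
        intro p hp
        rcases List.mem_append.mp hp with h | h
        · exact hpsfree p h
        · simp at h
          subst h
          exact hTfree)
    rw [hjm] at he
    have ht2 := pvTakeJoins_append_last (pvSplit (f.toList.map pvNorm)).dropLast [] T hpsne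
    rw [hjm] at ht2
    have hchain := he.trans ht2
    have := congrArg List.dropLast hchain
    simpa [List.dropLast_concat] using this
  · -- guard false on both sides
    have hgB : (PySem.List.slice f.toList (some 1) none).any (fun c => c == '\\' || c == '/') = false := by
      rw [hslice]
      rcases h' : (f.toList.drop 1).any (fun c => c == '\\' || c == '/') with _ | _
      · rfl
      · exact absurd (hguard.mp h') hg
    rw [if_neg (show ¬ ((PySem.List.slice f.toList (some 1) none).any (fun c => c == '\\' || c == '/') = true) by simp [hgB])]
    have hfilt : get_filter f = [] := by
      by_cases hm1 : '\\' ∈ f.toList.map pvNorm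
      · obtain ⟨c0, t, hmt⟩ : ∃ c0 t, f.toList.map pvNorm = c0 :: t := by
          cases hx : f.toList.map pvNorm with
          | nil => rw [hx] at hm1; simp at hm1
          | cons a b => exact ⟨a, b, rfl⟩
        have htf : '\\' ∉ t := by
          rw [hmt] at hg
          simpa using hg
        have hc0 : c0 = '\\' := by
          rcases List.mem_cons.mp (hmt ▸ hm1) with h | h
          · exact h.symm
          · exact absurd h htf
        have hsp : pvSplit (f.toList.map pvNorm) = [[], t] := by
          rw [hmt, hc0, pvSplit, if_pos rfl, pvSplit_of_sepfree t htf]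
        simp only [get_filter, hrep, pvRsplit1_eq, if_neg (by rw [hsp]; simp : ¬ (pvSplit (f.toList.map pvNorm)).length = 1)]
        rw [if_pos (by simp), hsp]
        rw [show ([[], t] : List (List Char)).dropLast = [[]] from rfl, PySem.Chars.join_singleton]
        rw [PySem.List.pyGetD_zero_cons]
      · have hsp1 : (pvSplit (f.toList.map pvNorm)).length = 1 :=
          (pvSplit_len_one_iff _).mpr hm1
        simp only [get_filter, hrep, pvRsplit1_eq, if_pos hsp1]
        simp
    rw [if_pos hfilt]

-- ===== VERDICT (by name: the statement is the Claim_ definition above) =====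
theorem collect_all_filters_spec : Claim_equal_collect_all_filters := by
  intro files _
  show collect_all_filters files = collect_all_filters_alt files
  unfold collect_all_filters collect_all_filters_alt
  congr 1
  funext filters kv
  congr 1
  funext filters f
  exact pvPerFile filters f
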